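-- pv_equiv track=rewrite | github.com/Deepakp143/Python-assessment-DS | Solution 4.py | get_number_of_days
-- ===== SOURCE A (Python) =====
-- def is_leap_year(year):
--     if year % 4 == 0:
--         if year % 100 == 0:
--             if year % 400 == 0:
--                 return True
--             return False
--         return True
--     return False
--
-- def get_number_of_days(year):
--     if is_leap_year(year):
--         return 366
--     else:
--         next_leap_year = year
--         while True:
--             next_leap_year += 1
--             if is_leap_year(next_leap_year):
--                 break
--         return (next_leap_year - year) * 365 + 1
-- ===== SOURCE B (Python) =====
-- def is_leap_year(year):
--     return year % 4 == 0 and (year % 100 != 0 or year % 400 == 0)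
--
-- def get_number_of_days(year):
--     if is_leap_year(year):
--         return 366
--     n = year + 4 - year % 4
--     if n % 100 == 0 and n % 400 != 0:
--         n += 4
--     return (n - year) * 365 + 1
-- ===== Notes on version B (the rewrite author's own statement) =====
-- stated objective: simpler
-- what changed: The while-loop search for the next leap year is replaced by a closed-form computation: the next larger multiple of four, plus a single century correction.
import Mathlib
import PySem

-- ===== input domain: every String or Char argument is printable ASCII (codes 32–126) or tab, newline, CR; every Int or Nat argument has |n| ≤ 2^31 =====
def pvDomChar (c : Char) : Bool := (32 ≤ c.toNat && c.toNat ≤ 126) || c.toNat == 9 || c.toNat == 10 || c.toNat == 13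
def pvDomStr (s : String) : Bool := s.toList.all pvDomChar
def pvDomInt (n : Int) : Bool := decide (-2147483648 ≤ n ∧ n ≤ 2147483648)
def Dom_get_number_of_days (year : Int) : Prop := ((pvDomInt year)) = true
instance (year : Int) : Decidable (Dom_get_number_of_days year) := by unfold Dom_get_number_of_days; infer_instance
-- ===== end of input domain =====

-- B replaces A's while-loop search for the next leap year by a closed-form computation (objective: simpler).

-- ===== PORT A =====
def is_leap_year (year : Int) : Bool :=
  if year % 4 == 0 then
    if year % 100 == 0 then
      if year % 400 == 0 then true
      else false
    else true
  else false

-- the while loop of A: repeatedly increment and test; terminates because the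
-- next multiple of 400 above n is a leap year
theorem is_leap_year_of_mod400 (n : Int) (h : n % 400 = 0) : is_leap_year n = true := by
  simp [is_leap_year]
  omega

def nextLeapLoop (n : Int) : Int :=
  let m := n + 1
  if is_leap_year m then m else nextLeapLoop m
termination_by (400 - n % 400).toNat
decreasing_by
  rename_i h
  have h400 : (n + 1) % 400 ≠ 0 := by
    intro hc
    exact h (is_leap_year_of_mod400 _ hc)
  omega

def get_number_of_days (year : Int) : Int :=
  if is_leap_year year then 366
  else
    let next_leap_year := nextLeapLoop year
    (next_leap_year - year) * 365 + 1

-- ===== PORT B =====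
def is_leap_year_b (year : Int) : Bool :=
  year % 4 == 0 && (year % 100 != 0 || year % 400 == 0)

def get_number_of_days_alt (year : Int) : Int :=
  if is_leap_year_b year then 366
  else
    let n := year + 4 - year % 4
    let n := if n % 100 == 0 && n % 400 != 0 then n + 4 else n
    (n - year) * 365 + 1

-- ===== PRECONDITION & SPEC =====
def Spec_get_number_of_days (year : Int) (out : Int) : Prop := out = get_number_of_days_alt year
instance (year : Int) (out : Int) : Decidable (Spec_get_number_of_days year out) := by unfold Spec_get_number_of_days; infer_instance

-- ===== CLAIM (what is proved, stated in full; the proofs are below) =====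
def Claim_equal_get_number_of_days : Prop := ∀ (year : Int), Dom_get_number_of_days year → Spec_get_number_of_days year (get_number_of_days year)

-- ===== LEMMAS AND PROOFS =====

theorem is_leap_year_iff (n : Int) :
    is_leap_year n = true ↔ (n % 4 = 0 ∧ (n % 100 ≠ 0 ∨ n % 400 = 0)) := by
  simp only [is_leap_year]
  split_ifs with h1 h2 h3 <;> simp_all

theorem is_leap_year_b_eq (n : Int) : is_leap_year_b n = is_leap_year n := by
  simp only [is_leap_year, is_leap_year_b]
  by_cases h4 : n % 4 = 0 <;> by_cases h100 : n % 100 = 0 <;>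
    by_cases h400 : n % 400 = 0 <;> simp [h4, h100, h400]

-- the loop returns m if m is the first leap year strictly above n
theorem nextLeapLoop_eq (n m : Int) (h1 : n < m) (h2 : is_leap_year m = true)
    (h3 : ∀ k, n < k → k < m → is_leap_year k = false) : nextLeapLoop n = m := by
  have hd : (m - n).toNat = (m - n) := by omega
  generalize hfuel : (m - n).toNat = fuel
  induction fuel generalizing n with
  | zero => omega
  | succ f ih =>
    rw [nextLeapLoop]
    by_cases hm : m = n + 1
    · simp [← hm, h2]
    · have hlt : n + 1 < m := by omega
      have : is_leap_year (n + 1) = false := h3 _ (by omega) hlt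
      simp only [this, Bool.false_eq_true, if_false]
      exact ih (n + 1) hlt (fun k hk1 hk2 => h3 k (by omega) hk2) (by omega) (by omega)

theorem not_leap_iff (n : Int) :
    is_leap_year n = false ↔ (n % 4 ≠ 0 ∨ (n % 100 = 0 ∧ n % 400 ≠ 0)) := by
  rw [← Bool.not_eq_true, is_leap_year_iff]
  tauto

-- ===== VERDICT (by name: the statement is the Claim_ definition above) =====
theorem get_number_of_days_spec : Claim_equal_get_number_of_days := by
  intro year _
  unfold Spec_get_number_of_days get_number_of_days get_number_of_days_alt
  rw [is_leap_year_b_eq]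
  by_cases hl : is_leap_year year = true
  · simp [hl]
  · have hl' : is_leap_year year = false := by simpa using hl
    simp only [hl', Bool.false_eq_true, if_false]
    have hly := (not_leap_iff year).mp hl'
    set n0 : Int := year + 4 - year % 4 with hn0
    by_cases hc : n0 % 100 = 0 ∧ n0 % 400 ≠ 0
    · have hloop : nextLeapLoop year = n0 + 4 := by
        apply nextLeapLoop_eq
        · omega
        · rw [is_leap_year_iff]; omega
        · intro k hk1 hk2
          rw [not_leap_iff]
          omega
      simp only [hloop]
      have : (n0 % 100 == 0 && n0 % 400 != 0) = true := by
        simp [hc.1, hc.2]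
      rw [this]
      simp
    · have hloop : nextLeapLoop year = n0 := by
        apply nextLeapLoop_eq
        · omega
        · rw [is_leap_year_iff]; omega
        · intro k hk1 hk2
          rw [not_leap_iff]
          omega
      simp only [hloop]
      have : (n0 % 100 == 0 && n0 % 400 != 0) = false := by
        by_cases h1 : n0 % 100 = 0 <;> by_cases h2 : n0 % 400 = 0 <;> simp [h1, h2] ; tauto
      rw [this]
      simp
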